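-- pv_equiv track=rewrite | github.com/Alferdize/Data-Structure-and-Algorithms | Algorithms/binary_search.com/contest_9/Particular_Paths.py | solve
-- ===== SOURCE A (Python) =====
-- from collections import defaultdict
--
-- def solve(matrix, k):
--     cum=[[defaultdict(int) for _ in matrix[0]] for _ in matrix]
--     cum[0][0][matrix[0][0]]+=1
--     for i in range(1,len(matrix)):
--         for v in cum[i-1][0].keys():
--             cum[i][0][v + matrix[i][0]]+=cum[i-1][0][v]
--     for j in range(1,len(matrix[0])):
--         for v in cum[0][j-1].keys():
--             cum[0][j][v+matrix[0][j]]+=cum[0][j-1][v]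
--     for i in range(1,len(matrix)):
--         for j in range(1,(len(matrix[0]))):
--             for v in cum[i-1][j].keys():
--                 cum[i][j][v + matrix[i][j]]+=cum[i-1][j][v]
--             for v in cum[i][j-1].keys():
--                 cum[i][j][v+matrix[i][j]]+=cum[i][j-1][v]
--     return cum[-1][-1][k] % (10**9 +  7)
-- ===== SOURCE B (Python) =====
-- def solve(matrix, k):
--     # Memoized top-down recursion: g(i, j) maps each achievable path sum
--     # from (0,0) to (i,j) to its number of paths; replaces A's prealloc
--     # grid of defaultdicts and three explicit boundary/interior loop phases.
--     memo = {}
--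
--     def g(i, j):
--         if (i, j) not in memo:
--             a = matrix[i][j]
--             if i == 0 and j == 0:
--                 d = {a: 1}
--             else:
--                 d = {}
--                 if i > 0:
--                     for s, c in g(i - 1, j).items():
--                         d[s + a] = d.get(s + a, 0) + c
--                 if j > 0:
--                     for s, c in g(i, j - 1).items():
--                         d[s + a] = d.get(s + a, 0) + c
--             memo[(i, j)] = d
--         return memo[(i, j)]
--
--     return g(len(matrix) - 1, len(matrix[0]) - 1).get(k, 0) % (10 ** 9 + 7)
-- ===== Notes on version B (the rewrite author's own statement) =====
-- stated objective: alternative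
-- what changed: A's preallocated 2D grid of defaultdicts filled by three separate iterative loop phases (first column, first row, interior) is replaced by a single memoized top-down recursion g(i,j) with one base case, plain dicts and .get defaults, computing only the cells reachable from the bottom-right corner.
import Mathlib
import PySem

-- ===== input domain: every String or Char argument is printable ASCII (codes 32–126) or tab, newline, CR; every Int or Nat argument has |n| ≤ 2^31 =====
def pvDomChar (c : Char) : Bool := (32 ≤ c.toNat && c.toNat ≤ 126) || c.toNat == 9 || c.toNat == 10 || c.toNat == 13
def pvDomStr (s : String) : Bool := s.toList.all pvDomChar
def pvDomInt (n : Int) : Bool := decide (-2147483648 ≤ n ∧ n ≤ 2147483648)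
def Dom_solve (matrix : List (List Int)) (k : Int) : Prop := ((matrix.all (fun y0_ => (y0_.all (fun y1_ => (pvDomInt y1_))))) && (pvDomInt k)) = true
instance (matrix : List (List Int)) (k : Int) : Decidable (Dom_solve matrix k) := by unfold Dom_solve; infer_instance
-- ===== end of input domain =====

-- B replaces A's preallocated grid of defaultdicts and three explicit loop phases by a
-- memoized top-down recursion over cells (objective: alternative); no argument is mutated.

-- ===== PORT A =====
-- matrix[i][j] for in-range indices (Pre_solve guarantees they are in range)
def aGet (mat : List (List Int)) (i j : Nat) : Int := (mat.getD i []).getD j 0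

-- 'for v in src.keys(): d[v + a] += src[v]' on defaultdict(int)
def dshift (a : Int) (src d0 : PySem.Dict Int Int) : PySem.Dict Int Int :=
  src.keys.foldl (fun d v => d.modify (v + a) 0 (· + src.getD v 0)) d0

-- the grid of dicts, cell (i, j) defaulting to the initial empty defaultdict
def gget (g : PySem.Dict (Nat × Nat) (PySem.Dict Int Int)) (i j : Nat) : PySem.Dict Int Int :=
  g.getD (i, j) PySem.Dict.empty

-- write cell (i, j) of the grid of dicts
def gset (g : PySem.Dict (Nat × Nat) (PySem.Dict Int Int)) (i j : Nat) (dd : PySem.Dict Int Int) : PySem.Dict (Nat × Nat) (PySem.Dict Int Int) :=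
  g.insert (i, j) dd

-- 'for i in range(1, len(matrix)): …' filling the first column
def colPhase (mat : List (List Int)) (g1 : PySem.Dict (Nat × Nat) (PySem.Dict Int Int)) (t : Nat) : PySem.Dict (Nat × Nat) (PySem.Dict Int Int) :=
  (List.range' 1 t).foldl
    (fun g i => gset g i 0 (dshift (aGet mat i 0) (gget g (i - 1) 0) (gget g i 0))) g1

-- 'for j in range(1, len(matrix[0])): …' filling the first row
def rowPhase (mat : List (List Int)) (g2 : PySem.Dict (Nat × Nat) (PySem.Dict Int Int)) (u : Nat) : PySem.Dict (Nat × Nat) (PySem.Dict Int Int) :=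
  (List.range' 1 u).foldl
    (fun g j => gset g 0 j (dshift (aGet mat 0 j) (gget g 0 (j - 1)) (gget g 0 j))) g2

-- the inner 'for j in range(1, len(matrix[0])): …' of the nested interior loops
def innerFold (mat : List (List Int)) (g : PySem.Dict (Nat × Nat) (PySem.Dict Int Int)) (i u : Nat) : PySem.Dict (Nat × Nat) (PySem.Dict Int Int) :=
  (List.range' 1 u).foldl
    (fun g j => gset g i j
      (dshift (aGet mat i j) (gget g i (j - 1))
        (dshift (aGet mat i j) (gget g (i - 1) j) (gget g i j)))) g

-- the outer 'for i in range(1, len(matrix)): …' of the nested interior loops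
def outerFold (mat : List (List Int)) (g : PySem.Dict (Nat × Nat) (PySem.Dict Int Int)) (t u : Nat) : PySem.Dict (Nat × Nat) (PySem.Dict Int Int) :=
  (List.range' 1 t).foldl (fun g i => innerFold mat g i u) g

def solve (matrix : List (List Int)) (k : Int) : Int :=
  let n := matrix.length
  let m := (matrix.headD []).length
  -- cum = grid of empty defaultdicts; cum[0][0][matrix[0][0]] += 1
  let g1 := gset PySem.Dict.empty 0 0
      ((PySem.Dict.empty).modify (aGet matrix 0 0) 0 (· + 1))
  let g2 := colPhase matrix g1 (n - 1)
  let g3 := rowPhase matrix g2 (m - 1)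
  let g4 := outerFold matrix g3 (n - 1) (m - 1)
  PySem.Int.mod ((gget g4 (n - 1) (m - 1)).getD k 0) (10 ^ 9 + 7)

-- ===== PORT B =====
-- 'for s, c in src.items(): d[s + a] = d.get(s + a, 0) + c'
def bmerge (a : Int) (src d0 : PySem.Dict Int Int) : PySem.Dict Int Int :=
  src.items.foldl (fun d p => d.modify (p.1 + a) 0 (· + p.2)) d0

-- the memoized recursion g(i, j) of Source B, memo threaded explicitly
def gmemo (mat : List (List Int)) (i j : Nat)
    (memo : PySem.Dict (Int × Int) (PySem.Dict Int Int)) :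
    PySem.Dict (Int × Int) (PySem.Dict Int Int) × PySem.Dict Int Int :=
  match memo.get? ((i : Int), (j : Int)) with
  | some d => (memo, d)
  | none =>
    let a := aGet mat i j
    if i = 0 ∧ j = 0 then
      let d := (PySem.Dict.empty).insert a 1
      (memo.insert ((i : Int), (j : Int)) d, d)
    else
      let r1 :=
        if _h1 : 0 < i then
          let r := gmemo mat (i - 1) j memo
          (r.1, bmerge a r.2 PySem.Dict.empty)
        else (memo, PySem.Dict.empty)
      let r2 :=
        if _h2 : 0 < j then
          let r := gmemo mat i (j - 1) r1.1
          (r.1, bmerge a r.2 r1.2)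
        else r1
      (r2.1.insert ((i : Int), (j : Int)) r2.2, r2.2)
  termination_by i + j
  decreasing_by all_goals omega

def solve_alt (matrix : List (List Int)) (k : Int) : Int :=
  let n := matrix.length
  let m := (matrix.headD []).length
  let d := (gmemo matrix (n - 1) (m - 1) PySem.Dict.empty).2
  PySem.Int.mod (d.getD k 0) (10 ^ 9 + 7)

-- ===== PRECONDITION & SPEC =====
-- Pre_solve = exactly the inputs on which Python A returns: a nonempty matrix whose first
-- row is nonempty and no row shorter than the first (otherwise A raises IndexError).
def Pre_solve (matrix : List (List Int)) (k : Int) : Prop :=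
  matrix ≠ [] ∧ 0 < (matrix.headD []).length ∧
    ∀ row ∈ matrix, (matrix.headD []).length ≤ row.length
instance (matrix : List (List Int)) (k : Int) : Decidable (Pre_solve matrix k) := by
  unfold Pre_solve; infer_instance

def pvWitness_solve : List (List Int) × Int := ([[1, 2], [3, 4]], 7)

def Spec_solve (matrix : List (List Int)) (k : Int) (out : Int) : Prop := out = solve_alt matrix k
instance (matrix : List (List Int)) (k : Int) (out : Int) : Decidable (Spec_solve matrix k out) := by
  unfold Spec_solve; infer_instance

-- ===== CLAIM (what is proved, stated in full; the proofs are below) =====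
def Claim_equal_solve : Prop := ∀ (matrix : List (List Int)) (k : Int),
  Dom_solve matrix k → Pre_solve matrix k → Spec_solve matrix k (solve matrix k)

-- ===== LEMMAS AND PROOFS =====

-- the memo-free value of B's recursion at cell (i, j)
def Gp (mat : List (List Int)) (i j : Nat) : PySem.Dict Int Int :=
  if i = 0 ∧ j = 0 then (PySem.Dict.empty).insert (aGet mat 0 0) 1
  else
    let a := aGet mat i j
    let d1 := if _h1 : 0 < i then bmerge a (Gp mat (i - 1) j) PySem.Dict.empty
              else PySem.Dict.empty
    if _h2 : 0 < j then bmerge a (Gp mat i (j - 1)) d1 else d1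
  termination_by i + j
  decreasing_by all_goals omega

-- generic lookup of the accumulation fold
theorem foldl_modify_shift (a s : Int) (L : List (Int × Int)) (d0 : PySem.Dict Int Int) :
    (L.foldl (fun d p => d.modify (p.1 + a) 0 (· + p.2)) d0).getD s 0
      = d0.getD s 0 + ((L.filter (fun p => p.1 + a == s)).map Prod.snd).sum := by
  induction L generalizing d0 with
  | nil => simp
  | cons p L ih =>
    simp only [List.foldl_cons, List.filter_cons]
    rw [ih]
    rw [PySem.Dict.getD_modify]
    by_cases h : s = p.1 + a
    · simp [h]
      ring
    · have h' : ¬ (p.1 + a == s) = true := by simp; omega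
      simp [h, h']

theorem filter_key_of_mem (L : List (Int × Int)) (a s v : Int)
    (hnd : (L.map Prod.fst).Nodup) (hv : (s - a, v) ∈ L) :
    L.filter (fun p => p.1 + a == s) = [(s - a, v)] := by
  induction L with
  | nil => simp at hv
  | cons p L ih =>
    simp only [List.map_cons, List.nodup_cons] at hnd
    rcases List.mem_cons.mp hv with h | h
    · subst h
      simp only [List.filter_cons]
      have : ((s - a) + a == s) = true := by simp
      simp only [this, if_pos]
      congr 1
      apply List.filter_eq_nil_iff.mpr
      intro q hq
      have hmem : q.1 ∈ L.map Prod.fst := List.mem_map_of_mem (f := Prod.fst) hq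
      have : q.1 ≠ s - a := by
        intro he; rw [he] at hmem; exact hnd.1 hmem
      simp; omega
    · have h1 : p.1 ≠ s - a := by
        intro he; exact hnd.1 (he ▸ List.mem_map_of_mem (f := Prod.fst) h)
      simp only [List.filter_cons]
      have : ¬ (p.1 + a == s) = true := by simp; omega
      simp only [this, if_false]
      exact ih hnd.2 h

theorem filter_key_of_not_mem (L : List (Int × Int)) (a s : Int)
    (hm : (s - a) ∉ L.map Prod.fst) :
    L.filter (fun p => p.1 + a == s) = [] := by
  apply List.filter_eq_nil_iff.mpr
  intro q hq
  have : q.1 ≠ s - a := fun he => hm (he ▸ List.mem_map_of_mem (f := Prod.fst) hq)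
  simp; omega

theorem bmerge_getD (a s : Int) (src d0 : PySem.Dict Int Int) (h : src.keys.Nodup) :
    (bmerge a src d0).getD s 0 = d0.getD s 0 + src.getD (s - a) 0 := by
  unfold bmerge
  rw [foldl_modify_shift]
  congr 1
  cases hg : src.get? (s - a) with
  | some v =>
    have hv : (s - a, v) ∈ src.items := PySem.Dict.mem_items_of_get?_eq_some src hg
    rw [filter_key_of_mem src.items a s v (by exact h) hv]
    simp [PySem.Dict.getD_of_get?_eq_some src 0 hg]
  | none =>
    have hm : (s - a) ∉ src.keys := by
      rw [← PySem.Dict.get?_eq_none_iff_not_mem_keys]; exact hg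
    rw [filter_key_of_not_mem src.items a s (by exact hm)]
    simp [PySem.Dict.getD_of_get?_eq_none src 0 hg]

theorem keys_map_getD (src : PySem.Dict Int Int) (h : src.keys.Nodup) :
    src.keys.map (fun v => (v, src.getD v 0)) = src.items := by
  show (src.items.map Prod.fst).map (fun v => (v, src.getD v 0)) = src.items
  rw [List.map_map]
  conv_rhs => rw [← List.map_id src.items]
  apply List.map_congr_left
  intro p hp
  have : src.getD p.1 0 = p.2 := by
    have hm : (p.1, p.2) ∈ src.items := by simpa using hp
    exact PySem.Dict.getD_of_mem_items src hm h 0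
  simp [Function.comp, this]

theorem dshift_eq_bmerge (a : Int) (src d0 : PySem.Dict Int Int) (h : src.keys.Nodup) :
    dshift a src d0 = bmerge a src d0 := by
  unfold dshift bmerge
  rw [← keys_map_getD src h, List.foldl_map]

theorem bmerge_nodup (a : Int) (src d0 : PySem.Dict Int Int) (h : d0.keys.Nodup) :
    (bmerge a src d0).keys.Nodup := by
  unfold bmerge
  exact PySem.Dict.nodup_keys_foldl_modify_key src.items (fun p => p.1 + a) 0
    (fun _ p => (· + p.2)) d0 h

theorem Gp_nodup (mat : List (List Int)) (i j : Nat) : (Gp mat i j).keys.Nodup := by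
  rw [Gp]
  by_cases h00 : i = 0 ∧ j = 0
  · rw [if_pos h00]
    exact PySem.Dict.nodup_keys_insert PySem.Dict.empty _ _ PySem.Dict.nodup_keys_empty
  · by_cases hi : 0 < i
    · by_cases hj : 0 < j
      · simp only [if_neg h00, dif_pos hi, dif_pos hj]
        exact bmerge_nodup _ _ _ (bmerge_nodup _ _ _ PySem.Dict.nodup_keys_empty)
      · simp only [if_neg h00, dif_pos hi, dif_neg hj]
        exact bmerge_nodup _ _ _ PySem.Dict.nodup_keys_empty
    · have hj : 0 < j := by omega
      simp only [if_neg h00, dif_neg hi, dif_pos hj]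
      exact bmerge_nodup _ _ _ PySem.Dict.nodup_keys_empty

-- lookup recurrences of Gp
theorem Gp_00 (mat : List (List Int)) (s : Int) :
    (Gp mat 0 0).getD s 0 = if s = aGet mat 0 0 then 1 else 0 := by
  rw [Gp]
  simp [PySem.Dict.getD_insert]

theorem Gp_i0 (mat : List (List Int)) (i : Nat) (hi : 0 < i) (s : Int) :
    (Gp mat i 0).getD s 0 = (Gp mat (i - 1) 0).getD (s - aGet mat i 0) 0 := by
  rw [Gp]
  have h1 : ¬ (i = 0 ∧ (0:Nat) = 0) := by omega
  rw [if_neg h1, dif_neg (show ¬ (0:Nat) < 0 by omega), dif_pos hi]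
  rw [bmerge_getD _ _ _ _ (Gp_nodup mat (i-1) 0)]
  simp

theorem Gp_0j (mat : List (List Int)) (j : Nat) (hj : 0 < j) (s : Int) :
    (Gp mat 0 j).getD s 0 = (Gp mat 0 (j - 1)).getD (s - aGet mat 0 j) 0 := by
  rw [Gp]
  have h1 : ¬ ((0:Nat) = 0 ∧ j = 0) := by omega
  rw [if_neg h1, dif_pos hj, dif_neg (show ¬ (0:Nat) < 0 by omega)]
  rw [bmerge_getD _ _ _ _ (Gp_nodup mat 0 (j-1))]
  simp

theorem Gp_ij (mat : List (List Int)) (i j : Nat) (hi : 0 < i) (hj : 0 < j) (s : Int) :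
    (Gp mat i j).getD s 0
      = (Gp mat (i - 1) j).getD (s - aGet mat i j) 0
        + (Gp mat i (j - 1)).getD (s - aGet mat i j) 0 := by
  rw [Gp]
  have h1 : ¬ (i = 0 ∧ j = 0) := by omega
  rw [if_neg h1, dif_pos hj, dif_pos hi]
  rw [bmerge_getD _ _ _ _ (Gp_nodup mat i (j-1)), bmerge_getD _ _ _ _ (Gp_nodup mat (i-1) j)]
  simp

-- ===== B side: the memoized recursion computes Gp =====
def MemoInv (mat : List (List Int)) (memo : PySem.Dict (Int × Int) (PySem.Dict Int Int)) : Prop :=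
  ∀ (i j : Nat) (d : PySem.Dict Int Int),
    memo.get? ((i : Int), (j : Int)) = some d → d = Gp mat i j

theorem MemoInv_insert (mat : List (List Int))
    (memo : PySem.Dict (Int × Int) (PySem.Dict Int Int)) (h : MemoInv mat memo) (i j : Nat) :
    MemoInv mat (memo.insert ((i : Int), (j : Int)) (Gp mat i j)) := by
  intro i' j' d' hd'
  rw [PySem.Dict.get?_insert] at hd'
  split at hd'
  · rename_i hk
    have : i' = i ∧ j' = j := by
      simpa [Prod.ext_iff] using hk
    obtain ⟨rfl, rfl⟩ := this
    cases hd'; rfl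
  · exact h i' j' d' hd'

theorem gmemo_spec (mat : List (List Int)) :
    ∀ (N i j : Nat) (memo : PySem.Dict (Int × Int) (PySem.Dict Int Int)), i + j ≤ N →
      MemoInv mat memo →
      (gmemo mat i j memo).2 = Gp mat i j ∧ MemoInv mat (gmemo mat i j memo).1 := by
  intro N
  induction N with
  | zero =>
    intro i j memo hle hinv
    have hi : i = 0 := by omega
    have hj : j = 0 := by omega
    subst hi; subst hj
    rw [gmemo]
    cases hg : memo.get? ((0 : Int), (0 : Int)) with
    | some d =>
      simp only [hg]
      exact ⟨hinv 0 0 d hg, hinv⟩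
    | none =>
      simp only [hg]
      have hGp : (Gp mat 0 0) = (PySem.Dict.empty).insert (aGet mat 0 0) 1 := by
        rw [Gp]; simp
      constructor
      · simp [hGp, aGet]
      · rw [show ((PySem.Dict.empty).insert (aGet mat 0 0) 1) = Gp mat 0 0 from hGp.symm]
        exact MemoInv_insert mat memo hinv 0 0
  | succ N ih =>
    intro i j memo hle hinv
    rw [gmemo]
    cases hg : memo.get? ((i : Int), (j : Int)) with
    | some d =>
      simp only [hg]
      exact ⟨hinv i j d hg, hinv⟩
    | none =>
      simp only [hg]
      by_cases h00 : i = 0 ∧ j = 0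
      · obtain ⟨rfl, rfl⟩ := h00
        simp only [if_pos (⟨rfl, rfl⟩ : (0:Nat) = 0 ∧ (0:Nat) = 0)]
        have hGp : (Gp mat 0 0) = (PySem.Dict.empty).insert (aGet mat 0 0) 1 := by
          rw [Gp]; simp
        refine ⟨by simp [hGp], ?_⟩
        rw [show ((PySem.Dict.empty).insert (aGet mat 0 0) 1) = Gp mat 0 0 from hGp.symm]
        exact MemoInv_insert mat memo hinv 0 0
      · simp only [if_neg h00]
        by_cases hi : 0 < i
        · by_cases hj : 0 < j
          · obtain ⟨e1, v1⟩ := ih (i - 1) j memo (by omega) hinv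
            simp only [dif_pos hi, dif_pos hj]
            obtain ⟨e2, v2⟩ := ih i (j - 1) (gmemo mat (i - 1) j memo).1 (by omega) v1
            rw [e1, e2]
            have hGp : Gp mat i j
                = bmerge (aGet mat i j) (Gp mat i (j - 1))
                    (bmerge (aGet mat i j) (Gp mat (i - 1) j) PySem.Dict.empty) := by
              rw [Gp]; simp only [if_neg h00, dif_pos hi, dif_pos hj]
            refine ⟨hGp.symm, ?_⟩
            rw [← hGp]
            exact MemoInv_insert mat _ v2 i j
          · obtain ⟨e1, v1⟩ := ih (i - 1) j memo (by omega) hinv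
            simp only [dif_pos hi, dif_neg hj]
            rw [e1]
            have hGp : Gp mat i j
                = bmerge (aGet mat i j) (Gp mat (i - 1) j) PySem.Dict.empty := by
              rw [Gp]; simp only [if_neg h00, dif_pos hi, dif_neg hj]
            refine ⟨hGp.symm, ?_⟩
            rw [← hGp]
            exact MemoInv_insert mat _ v1 i j
        · have hj : 0 < j := by omega
          obtain ⟨e1, v1⟩ := ih i (j - 1) memo (by omega) hinv
          simp only [dif_neg hi, dif_pos hj]
          rw [e1]
          have hGp : Gp mat i j
              = bmerge (aGet mat i j) (Gp mat i (j - 1)) PySem.Dict.empty := by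
            rw [Gp]; simp only [if_neg h00, dif_neg hi, dif_pos hj]
          refine ⟨hGp.symm, ?_⟩
          rw [← hGp]
          exact MemoInv_insert mat _ v1 i j

-- ===== A side: the forward grid has the same lookups as Gp =====

-- cell (i, j) of grid g agrees with Gp and has unique keys
def OK (mat : List (List Int)) (g : PySem.Dict (Nat × Nat) (PySem.Dict Int Int)) (i j : Nat) : Prop :=
  (∀ s, (gget g i j).getD s 0 = (Gp mat i j).getD s 0) ∧ (gget g i j).keys.Nodup

theorem gget_gset_self (g : PySem.Dict (Nat × Nat) (PySem.Dict Int Int)) (i j : Nat) (dd : PySem.Dict Int Int) :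
    gget (gset g i j dd) i j = dd := by
  unfold gget gset
  rw [PySem.Dict.getD_insert]
  simp

theorem gget_gset_other (g : PySem.Dict (Nat × Nat) (PySem.Dict Int Int)) (i j i' j' : Nat)
    (dd : PySem.Dict Int Int) (h : ¬ (i' = i ∧ j' = j)) :
    gget (gset g i j dd) i' j' = gget g i' j' := by
  unfold gget gset
  rw [PySem.Dict.getD_insert]
  rw [if_neg (by simpa [Prod.ext_iff] using h)]

theorem OK_congr (mat : List (List Int)) (g g' : PySem.Dict (Nat × Nat) (PySem.Dict Int Int)) (i j : Nat)
    (he : gget g' i j = gget g i j) (h : OK mat g i j) : OK mat g' i j := by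
  constructor
  · intro s; rw [he]; exact h.1 s
  · rw [he]; exact h.2

theorem colPhase_succ (mat : List (List Int)) (g1 : PySem.Dict (Nat × Nat) (PySem.Dict Int Int)) (t : Nat) :
    colPhase mat g1 (t + 1)
      = (fun g => gset g (1 + t) 0
          (dshift (aGet mat (1 + t) 0) (gget g (1 + t - 1) 0) (gget g (1 + t) 0)))
          (colPhase mat g1 t) := by
  unfold colPhase
  rw [List.range'_1_concat, List.foldl_append]
  rfl

theorem rowPhase_succ (mat : List (List Int)) (g2 : PySem.Dict (Nat × Nat) (PySem.Dict Int Int)) (u : Nat) :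
    rowPhase mat g2 (u + 1)
      = (fun g => gset g 0 (1 + u)
          (dshift (aGet mat 0 (1 + u)) (gget g 0 (1 + u - 1)) (gget g 0 (1 + u))))
          (rowPhase mat g2 u) := by
  unfold rowPhase
  rw [List.range'_1_concat, List.foldl_append]
  rfl

theorem innerFold_succ (mat : List (List Int)) (g : PySem.Dict (Nat × Nat) (PySem.Dict Int Int)) (i u : Nat) :
    innerFold mat g i (u + 1)
      = (fun g' => gset g' i (1 + u)
          (dshift (aGet mat i (1 + u)) (gget g' i (1 + u - 1))
            (dshift (aGet mat i (1 + u)) (gget g' (i - 1) (1 + u)) (gget g' i (1 + u)))))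
          (innerFold mat g i u) := by
  unfold innerFold
  rw [List.range'_1_concat, List.foldl_append]
  rfl

theorem outerFold_succ (mat : List (List Int)) (g : PySem.Dict (Nat × Nat) (PySem.Dict Int Int)) (t u : Nat) :
    outerFold mat g (t + 1) u = innerFold mat (outerFold mat g t u) (1 + t) u := by
  unfold outerFold
  rw [List.range'_1_concat, List.foldl_append]
  rfl

theorem colPhase_inv (mat : List (List Int)) (g1 : PySem.Dict (Nat × Nat) (PySem.Dict Int Int))
    (H0 : OK mat g1 0 0) (HE : ∀ i j, ¬ (i = 0 ∧ j = 0) → gget g1 i j = PySem.Dict.empty)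
    (t : Nat) :
    (∀ i, i ≤ t → OK mat (colPhase mat g1 t) i 0) ∧
    (∀ i j, (0 < j ∨ t < i) → gget (colPhase mat g1 t) i j = gget g1 i j) := by
  induction t with
  | zero =>
    refine ⟨?_, fun i j _ => rfl⟩
    intro i hi
    interval_cases i
    exact H0
  | succ t ih =>
    have hOKt : OK mat (colPhase mat g1 t) t 0 := ih.1 t (by omega)
    have hemp : gget (colPhase mat g1 t) (1 + t) 0 = PySem.Dict.empty := by
      rw [ih.2 (1 + t) 0 (Or.inr (by omega)), HE (1 + t) 0 (by omega)]
    have hval : gget (colPhase mat g1 (t + 1)) (1 + t) 0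
        = bmerge (aGet mat (1 + t) 0) (gget (colPhase mat g1 t) t 0) PySem.Dict.empty := by
      rw [colPhase_succ]
      show gget (gset (colPhase mat g1 t) (1 + t) 0 _) (1 + t) 0 = _
      rw [gget_gset_self, show 1 + t - 1 = t from by omega, hemp,
        dshift_eq_bmerge _ _ _ hOKt.2]
    have huntouched : ∀ i j, ¬ (i = 1 + t ∧ j = 0) →
        gget (colPhase mat g1 (t + 1)) i j = gget (colPhase mat g1 t) i j := by
      intro i j h
      rw [colPhase_succ]
      show gget (gset (colPhase mat g1 t) (1 + t) 0 _) i j = _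
      rw [gget_gset_other _ _ _ _ _ _ h]
    constructor
    · intro i hi
      by_cases hit : i = 1 + t
      · subst hit
        constructor
        · intro s
          rw [hval, bmerge_getD _ _ _ _ hOKt.2, hOKt.1,
            Gp_i0 mat (1 + t) (by omega) s, show 1 + t - 1 = t from by omega]
          simp
        · rw [hval]
          exact bmerge_nodup _ _ _ PySem.Dict.nodup_keys_empty
      · exact OK_congr mat _ _ i 0 (huntouched i 0 (by omega)) (ih.1 i (by omega))
    · intro i j hij
      rw [huntouched i j (by omega), ih.2 i j (by omega)]

theorem rowPhase_inv (mat : List (List Int)) (g2 : PySem.Dict (Nat × Nat) (PySem.Dict Int Int))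
    (H0 : OK mat g2 0 0) (HE : ∀ j, 0 < j → gget g2 0 j = PySem.Dict.empty) (u : Nat) :
    (∀ j, j ≤ u → OK mat (rowPhase mat g2 u) 0 j) ∧
    (∀ i j, (0 < i ∨ u < j) → gget (rowPhase mat g2 u) i j = gget g2 i j) := by
  induction u with
  | zero =>
    refine ⟨?_, fun i j _ => rfl⟩
    intro j hj
    interval_cases j
    exact H0
  | succ u ih =>
    have hOKu : OK mat (rowPhase mat g2 u) 0 u := ih.1 u (by omega)
    have hemp : gget (rowPhase mat g2 u) 0 (1 + u) = PySem.Dict.empty := by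
      rw [ih.2 0 (1 + u) (Or.inr (by omega)), HE (1 + u) (by omega)]
    have hval : gget (rowPhase mat g2 (u + 1)) 0 (1 + u)
        = bmerge (aGet mat 0 (1 + u)) (gget (rowPhase mat g2 u) 0 u) PySem.Dict.empty := by
      rw [rowPhase_succ]
      show gget (gset (rowPhase mat g2 u) 0 (1 + u) _) 0 (1 + u) = _
      rw [gget_gset_self, show 1 + u - 1 = u from by omega, hemp,
        dshift_eq_bmerge _ _ _ hOKu.2]
    have huntouched : ∀ i j, ¬ (i = 0 ∧ j = 1 + u) →
        gget (rowPhase mat g2 (u + 1)) i j = gget (rowPhase mat g2 u) i j := by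
      intro i j h
      rw [rowPhase_succ]
      show gget (gset (rowPhase mat g2 u) 0 (1 + u) _) i j = _
      rw [gget_gset_other _ _ _ _ _ _ h]
    constructor
    · intro j hj
      by_cases hju : j = 1 + u
      · subst hju
        constructor
        · intro s
          rw [hval, bmerge_getD _ _ _ _ hOKu.2, hOKu.1,
            Gp_0j mat (1 + u) (by omega) s, show 1 + u - 1 = u from by omega]
          simp
        · rw [hval]
          exact bmerge_nodup _ _ _ PySem.Dict.nodup_keys_empty
      · exact OK_congr mat _ _ 0 j (huntouched 0 j (by omega)) (ih.1 j (by omega))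
    · intro i j hij
      rw [huntouched i j (by omega), ih.2 i j (by omega)]

theorem innerFold_inv (mat : List (List Int)) (g : PySem.Dict (Nat × Nat) (PySem.Dict Int Int))
    (i mu : Nat) (hi : 0 < i)
    (Hc : OK mat g i 0)
    (Hup : ∀ j, j ≤ mu → OK mat g (i - 1) j)
    (HE : ∀ j, 0 < j → j ≤ mu → gget g i j = PySem.Dict.empty) :
    ∀ u, u ≤ mu →
      (∀ j, 0 < j → j ≤ u → OK mat (innerFold mat g i u) i j) ∧
      (∀ i' j', (i' ≠ i ∨ j' = 0 ∨ u < j') →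
        gget (innerFold mat g i u) i' j' = gget g i' j') := by
  intro u
  induction u with
  | zero =>
    intro _
    exact ⟨fun j hj hj' => by omega, fun i' j' _ => rfl⟩
  | succ u ih =>
    intro hu
    obtain ⟨ih1, ih2⟩ := ih (by omega)
    have hleft : OK mat (innerFold mat g i u) i u := by
      by_cases hu0 : u = 0
      · subst hu0
        exact OK_congr mat _ _ i 0 (ih2 i 0 (Or.inr (Or.inl rfl))) Hc
      · exact ih1 u (by omega) (by omega)
    have hup : OK mat (innerFold mat g i u) (i - 1) (1 + u) := by
      refine OK_congr mat _ _ _ _ (ih2 (i - 1) (1 + u) (Or.inl (by omega))) ?_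
      exact Hup (1 + u) (by omega)
    have hemp : gget (innerFold mat g i u) i (1 + u) = PySem.Dict.empty := by
      rw [ih2 i (1 + u) (Or.inr (Or.inr (by omega))), HE (1 + u) (by omega) (by omega)]
    have hval : gget (innerFold mat g i (u + 1)) i (1 + u)
        = bmerge (aGet mat i (1 + u)) (gget (innerFold mat g i u) i u)
            (bmerge (aGet mat i (1 + u)) (gget (innerFold mat g i u) (i - 1) (1 + u))
              PySem.Dict.empty) := by
      rw [innerFold_succ]
      show gget (gset (innerFold mat g i u) i (1 + u) _) i (1 + u) = _
      rw [gget_gset_self, show 1 + u - 1 = u from by omega, hemp,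
        dshift_eq_bmerge _ _ _ hup.2,
        dshift_eq_bmerge _ _ _ hleft.2]
    have huntouched : ∀ i' j', ¬ (i' = i ∧ j' = 1 + u) →
        gget (innerFold mat g i (u + 1)) i' j' = gget (innerFold mat g i u) i' j' := by
      intro i' j' h
      rw [innerFold_succ]
      show gget (gset (innerFold mat g i u) i (1 + u) _) i' j' = _
      rw [gget_gset_other _ _ _ _ _ _ h]
    constructor
    · intro j hj0 hj
      by_cases hju : j = 1 + u
      · subst hju
        constructor
        · intro s
          rw [hval, bmerge_getD _ _ _ _ hleft.2, bmerge_getD _ _ _ _ hup.2,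
            hleft.1, hup.1, Gp_ij mat i (1 + u) hi (by omega) s,
            show 1 + u - 1 = u from by omega]
          simp
        · rw [hval]
          exact bmerge_nodup _ _ _ (bmerge_nodup _ _ _ PySem.Dict.nodup_keys_empty)
      · exact OK_congr mat _ _ i j (huntouched i j (by omega)) (ih1 j hj0 (by omega))
    · intro i' j' h
      rw [huntouched i' j' (by omega), ih2 i' j' (by omega)]

theorem outerFold_inv (mat : List (List Int)) (g3 : PySem.Dict (Nat × Nat) (PySem.Dict Int Int))
    (n' m' : Nat)
    (F1 : ∀ i, i ≤ n' → OK mat g3 i 0)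
    (F2 : ∀ j, j ≤ m' → OK mat g3 0 j)
    (F3 : ∀ i j, 0 < i → 0 < j → j ≤ m' → gget g3 i j = PySem.Dict.empty) :
    ∀ t, t ≤ n' →
      (∀ i j, 0 < i → i ≤ t → 0 < j → j ≤ m' → OK mat (outerFold mat g3 t m') i j) ∧
      (∀ i, i ≤ n' → OK mat (outerFold mat g3 t m') i 0) ∧
      (∀ j, j ≤ m' → OK mat (outerFold mat g3 t m') 0 j) ∧
      (∀ i j, t < i → 0 < j → j ≤ m' →
        gget (outerFold mat g3 t m') i j = PySem.Dict.empty) := by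
  intro t
  induction t with
  | zero =>
    intro _
    exact ⟨fun i j h1 h2 _ _ => by omega, F1, F2, fun i j _ => F3 i j (by omega)⟩
  | succ t ih =>
    intro ht
    obtain ⟨W1, W2, W3, W4⟩ := ih (by omega)
    have hInner := innerFold_inv mat (outerFold mat g3 t m') (1 + t) m' (by omega)
      (W2 (1 + t) (by omega))
      (by
        intro j hj
        by_cases hj0 : j = 0
        · subst hj0; exact W2 (1 + t - 1) (by omega)
        · by_cases ht0 : t = 0
          · subst ht0
            have := W3 j hj
            simpa using this
          · have := W1 (1 + t - 1) j (by omega) (by omega) (by omega) hj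
            simpa using this)
      (fun j hj0 hj => W4 (1 + t) j (by omega) hj0 hj)
      m' (le_refl m')
    obtain ⟨I1, I2⟩ := hInner
    rw [outerFold_succ]
    refine ⟨?_, ?_, ?_, ?_⟩
    · intro i j hi0 hit hj0 hj
      by_cases hit' : i = 1 + t
      · subst hit'; exact I1 j hj0 hj
      · exact OK_congr mat _ _ i j (I2 i j (Or.inl (by omega))) (W1 i j hi0 (by omega) hj0 hj)
    · intro i hin
      exact OK_congr mat _ _ i 0 (I2 i 0 (Or.inr (Or.inl rfl))) (W2 i hin)
    · intro j hj
      by_cases hj0 : j = 0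
      · subst hj0
        exact OK_congr mat _ _ 0 0 (I2 0 0 (Or.inr (Or.inl rfl))) (W2 0 (by omega))
      · exact OK_congr mat _ _ 0 j (I2 0 j (Or.inl (by omega))) (W3 j hj)
    · intro i j hti hj0 hj
      rw [I2 i j (Or.inl (by omega))]
      exact W4 i j (by omega) hj0 hj

theorem solve_eq (matrix : List (List Int)) (k : Int) (hpre : Pre_solve matrix k) :
    solve matrix k
      = PySem.Int.mod ((Gp matrix (matrix.length - 1) ((matrix.headD []).length - 1)).getD k 0)
          (10 ^ 9 + 7) := by
  obtain ⟨hne, hm, _⟩ := hpre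
  set mat := matrix with hmat
  set n' := matrix.length - 1 with hn'
  set m' := (matrix.headD []).length - 1 with hm'
  set d00 := (PySem.Dict.empty : PySem.Dict Int Int).modify (aGet mat 0 0) 0 (· + 1) with hd00
  set g1 := gset PySem.Dict.empty 0 0 d00 with hg1
  have H0 : OK mat g1 0 0 := by
    constructor
    · intro s
      rw [hg1, gget_gset_self, hd00, PySem.Dict.getD_modify, Gp_00]
      simp
    · rw [hg1, gget_gset_self, hd00, PySem.Dict.keys_modify]
      exact PySem.Dict.nodup_keys_insert _ _ _ PySem.Dict.nodup_keys_empty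
  have HE1 : ∀ i j, ¬ (i = 0 ∧ j = 0) → gget g1 i j = PySem.Dict.empty := by
    intro i j h
    rw [hg1, gget_gset_other _ _ _ _ _ _ h]
    simp [gget]
  set g2 := colPhase mat g1 n' with hg2
  obtain ⟨C1, C2⟩ := colPhase_inv mat g1 H0 HE1 n'
  set g3 := rowPhase mat g2 m' with hg3
  obtain ⟨R1, R2⟩ := rowPhase_inv mat g2 (C1 0 (by omega))
    (by intro j hj; rw [hg2, C2 0 j (Or.inl hj)]; exact HE1 0 j (by omega)) m'
  have F1 : ∀ i, i ≤ n' → OK mat g3 i 0 := by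
    intro i hi
    by_cases hi0 : i = 0
    · subst hi0; exact R1 0 (by omega)
    · exact OK_congr mat _ _ i 0 (R2 i 0 (Or.inl (by omega))) (C1 i hi)
  have F3 : ∀ i j, 0 < i → 0 < j → j ≤ m' → gget g3 i j = PySem.Dict.empty := by
    intro i j hi0 hj0 _
    rw [hg3, R2 i j (Or.inl hi0), hg2, C2 i j (Or.inl hj0)]
    exact HE1 i j (by omega)
  obtain ⟨W1, W2, W3, _⟩ := outerFold_inv mat g3 n' m' F1 R1 F3 n' (le_refl n')
  have hfinal : OK mat (outerFold mat g3 n' m') n' m' := by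
    by_cases hn0 : n' = 0
    · have h := W3 m' (le_refl m')
      simpa [hn0] using h
    · by_cases hm0 : m' = 0
      · have h := W2 n' (le_refl n')
        simpa [hm0] using h
      · exact W1 n' m' (by omega) (le_refl n') (by omega) (le_refl m')
  show PySem.Int.mod ((gget (outerFold mat g3 n' m') n' m').getD k 0) (10 ^ 9 + 7) = _
  rw [hfinal.1 k]

-- ===== VERDICT (by name: the statement is the Claim_ definition above) =====
theorem solve_spec : Claim_equal_solve := by
  intro matrix k _hdom hpre
  unfold Spec_solve solve_alt
  have hB := (gmemo_spec matrix
      ((matrix.length - 1) + ((matrix.headD []).length - 1))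
      (matrix.length - 1) ((matrix.headD []).length - 1)
      PySem.Dict.empty (le_refl _)
      (by intro i j d h; simp [PySem.Dict.get?_empty] at h)).1
  simp only [solve_eq matrix k hpre, hB]
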